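-- pv_equiv track=rewrite | github.com/VeeraSaiJoshik/AllStateJarvis | TUI/solutions/dp/digit_dp.py | count_exact_distinct_digits
-- ===== SOURCE A (Python) =====
-- from functools import lru_cache
--
-- def count_exact_distinct_digits(N, m):
--     """
--     Count integers in [1..N] using exactly m distinct digit values.
--
--     Example:
--         count_exact_distinct_digits(99, 2) → 72  # all 2-digit numbers with 2 distinct digits
--         count_exact_distinct_digits(9, 1)  → 9   # 1..9 each has 1 distinct digit
--     """
--     s = str(N)
--     n = len(s)
--
--     @lru_cache(maxsize=None)
--     def dp(pos, digit_mask, tight, started):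
--         # digit_mask: bitmask of which digits (0-9) have been used
--         if pos == n:
--             if not started:
--                 return 0
--             return 1 if bin(digit_mask).count('1') == m else 0
--         limit = int(s[pos]) if tight else 9
--         total = 0
--         for d in range(0, limit + 1):
--             if not started and d == 0:
--                 total += dp(pos + 1, 0, tight and (d == limit), False)
--             else:
--                 new_mask = digit_mask | (1 << d)
--                 # Prune: can't exceed m distinct digits
--                 if bin(new_mask).count('1') > m:
--                     continue
--                 total += dp(pos + 1, new_mask, tight and (d == limit), True)
--         return total
--
--     result = dp(0, 0, True, False)
--     dp.cache_clear()
--     return result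
-- ===== SOURCE B (Python) =====
-- def count_exact_distinct_digits(N, m):
--     """
--     Count integers in [1..N] using exactly m distinct digit values.
--
--     Instead of a memoized DP over 1024 digit bitmasks, precompute two small
--     recurrence tables indexed only by the NUMBER of distinct digits used
--     (the count of completions depends only on that number, not on which
--     digits they are), then do one left-to-right pass over the digits of N.
--     """
--     s = str(N)
--     n = len(s)
--     # row[k] after r steps = G[r][k]: number of ways to append r more digits
--     # (each 0-9) to a started number that already uses k distinct digits so
--     # that it ends with exactly m distinct digits.  H[r]: numbers with at
--     # most r digits (i.e. still un-started) having exactly m distinct digits.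
--     row = [1 if k == m else 0 for k in range(12)]
--     G = [row]
--     H = [0]
--     for _ in range(n):
--         new = [0 if k > m else k * row[k] + (10 - k) * row[k + 1]
--                for k in range(11)] + [0]
--         H.append(H[-1] + 9 * row[1])
--         G.append(new)
--         row = new
--     total = 0
--     used = set()
--     started = False
--     for i, ch in enumerate(s):
--         D = int(ch)
--         r = n - 1 - i
--         for d in range(D):
--             if not started and d == 0:
--                 total += H[r]
--             else:
--                 k2 = len(used | {d})
--                 if k2 <= m:
--                     total += G[r][k2]
--         if started or D != 0:
--             used.add(D)
--             started = True
--     if started and len(used) == m: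
--         total += 1
--     return total
-- ===== Notes on version B (the rewrite author's own statement) =====
-- stated objective: faster
-- what changed: Replaces the memoized DP over 1024 digit bitmasks by two small recurrence tables indexed only by the NUMBER of distinct digits used (completions depend only on that count), plus one left-to-right pass over the digits of N tracking the tight prefix's actual digit set.
import Mathlib
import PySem

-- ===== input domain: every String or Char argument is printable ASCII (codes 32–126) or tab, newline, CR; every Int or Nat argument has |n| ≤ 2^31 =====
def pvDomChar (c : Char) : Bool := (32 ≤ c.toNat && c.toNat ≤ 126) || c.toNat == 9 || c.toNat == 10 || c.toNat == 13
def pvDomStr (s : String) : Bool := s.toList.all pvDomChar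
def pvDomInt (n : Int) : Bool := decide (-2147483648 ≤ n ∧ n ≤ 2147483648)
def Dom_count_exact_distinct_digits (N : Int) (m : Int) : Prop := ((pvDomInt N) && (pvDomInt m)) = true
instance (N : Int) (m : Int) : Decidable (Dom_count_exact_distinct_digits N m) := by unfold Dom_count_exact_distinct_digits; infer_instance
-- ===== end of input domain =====

-- B replaces A's memoized DP over 1024 digit bitmasks by two small tables indexed by the
-- COUNT of distinct digits used, plus one left-to-right pass over the digits of N (faster
-- in a timing run; same return value on every N ≥ 0).

-- ===== PORT A =====

-- bin(x).count('1') for x ≥ 0 (masks are always ≥ 0 here): population count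
def pvPopA : Nat → Nat
  | 0 => 0
  | n+1 => (n+1) % 2 + pvPopA ((n+1) / 2)
decreasing_by exact Nat.div_lt_self (Nat.succ_pos n) one_lt_two

-- int(s[pos]) for the single char s[pos]; exact for digit chars '0'..'9' (a non-digit char,
-- i.e. N < 0, makes Python raise ValueError — excluded by Pre_)
def pvDigitA (c : Char) : Nat := c.toNat - 48

-- the inner @lru_cache dp — memoization does not change the value, ported as plain recursion
def pvDpA (s : List Char) (m : Int) (pos : Nat) (mask : Nat) (tight : Bool) (started : Bool) : Int :=
  if h : s.length ≤ pos then
    if started = false then 0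
    else if (pvPopA mask : Int) = m then 1 else 0
  else
    let limit : Nat := if tight then pvDigitA (s[pos]'(by omega)) else 9
    (List.range (limit + 1)).foldl
      (fun total d =>
        if !started && d == 0 then
          total + pvDpA s m (pos + 1) 0 (tight && (d == limit)) false
        else
          let newMask := mask ||| (1 <<< d)
          if (pvPopA newMask : Int) > m then total
          else total + pvDpA s m (pos + 1) newMask (tight && (d == limit)) true)
      0
termination_by s.length - pos
decreasing_by all_goals omega

def count_exact_distinct_digits (N : Int) (m : Int) : Int :=
  let s := (PySem.Int.toStr N).toList
  pvDpA s m 0 0 true false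

-- ===== PORT B =====

-- int(ch) for a digit char (N < 0 would raise ValueError in Source B too — excluded by Pre_)
def pvDigitB (c : Char) : Nat := c.toNat - 48

-- row = [1 if k == m else 0 for k in range(12)]
def pvRow0B (m : Int) : List Int := (List.range 12).map (fun (k : Nat) => if (k : Int) = m then 1 else 0)

-- new = [0 if k > m else k*row[k] + (10-k)*row[k+1] for k in range(11)] + [0]
def pvStepB (m : Int) (row : List Int) : List Int :=
  ((List.range 11).map (fun (k : Nat) =>
    if (k : Int) > m then 0
    else (k : Int) * row.getD k 0 + ((10 : Int) - (k : Int)) * row.getD (k + 1) 0)) ++ [0]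

-- the table-building loop: G grows a row per iteration from the previous row, H alongside
def pvTablesB (m : Int) (n : Nat) : List (List Int) × List Int :=
  (List.range n).foldl
    (fun st _ =>
      let row := st.1.getLastD []
      (st.1 ++ [pvStepB m row], st.2 ++ [st.2.getLastD 0 + 9 * row.getD 1 0]))
    ([pvRow0B m], [0])

def count_exact_distinct_digits_alt (N : Int) (m : Int) : Int :=
  let s := (PySem.Int.toStr N).toList
  let n := s.length
  let t := pvTablesB m n
  let G := t.1
  let H := t.2
  let res := (PySem.List.enumerate s).foldl
    (fun (st : Int × PySem.Set Int × Bool) p =>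
      let total := st.1
      let used := st.2.1
      let started := st.2.2
      let D : Nat := pvDigitB p.2
      let r : Nat := n - 1 - p.1.toNat   -- = python's n-1-i (i ranges over 0..n-1, so no clamp)
      let total :=
        (List.range D).foldl
          (fun t (d : Nat) =>
            if !started && d == 0 then t + H.getD r 0
            else
              let k2 := (PySem.Set.add used (d : Int)).length
              if (k2 : Int) ≤ m then t + (G.getD r []).getD k2 0 else t)
          total
      if started || D != 0 then (total, PySem.Set.add used (D : Int), true)
      else (total, used, started))
    (0, (PySem.Set.empty : PySem.Set Int), false)
  if res.2.2 && (res.2.1.length : Int) == m then res.1 + 1 else res.1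

-- ===== PRECONDITION & SPEC =====
-- Pre_ excludes N < 0: there str(N) starts with '-' and A raises ValueError at int(s[0])
-- (B raises ValueError on the same inputs).
def Pre_count_exact_distinct_digits (N : Int) (m : Int) : Prop := 0 ≤ N
instance (N : Int) (m : Int) : Decidable (Pre_count_exact_distinct_digits N m) := by
  unfold Pre_count_exact_distinct_digits; infer_instance

def pvWitness_count_exact_distinct_digits : Int × Int := (99, 2)

def Spec_count_exact_distinct_digits (N : Int) (m : Int) (out : Int) : Prop := out = count_exact_distinct_digits_alt N m
instance (N : Int) (m : Int) (out : Int) : Decidable (Spec_count_exact_distinct_digits N m out) := by unfold Spec_count_exact_distinct_digits; infer_instance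

-- ===== CLAIM (what is proved, stated in full; the proofs are below) =====
def Claim_equal_count_exact_distinct_digits : Prop := ∀ (N : Int) (m : Int), Dom_count_exact_distinct_digits N m → Pre_count_exact_distinct_digits N m → Spec_count_exact_distinct_digits N m (count_exact_distinct_digits N m)

-- ===== LEMMAS AND PROOFS =====

-- proof-side view of B's tables: the r-th row / H-entry
def pvRow (m : Int) : Nat → List Int
  | 0 => pvRow0B m
  | r+1 => pvStepB m (pvRow m r)

def pvH (m : Int) : Nat → Int
  | 0 => 0
  | r+1 => pvH m r + 9 * (pvRow m r).getD 1 0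

-- number of set bits among bit positions 0..9
def pvBc (mask : Nat) : Nat := (List.range 10).countP (fun j => mask.testBit j)

theorem pvTablesB_eq (m : Int) (n : Nat) :
    pvTablesB m n = ((List.range (n+1)).map (pvRow m), (List.range (n+1)).map (pvH m)) := by
  induction n with
  | zero => simp [pvTablesB, pvRow, pvH]
  | succ n ih =>
    unfold pvTablesB at ih ⊢
    rw [List.range_succ, List.foldl_append, ih]
    simp only [List.foldl_cons, List.foldl_nil]
    rw [show List.range (n+1) = List.range n ++ [n] from List.range_succ]
    simp only [List.map_append, List.map_cons, List.map_nil, List.getLastD_concat]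
    rw [show List.range (n+1+1) = List.range (n+1) ++ [n+1] from List.range_succ,
        show List.range (n+1) = List.range n ++ [n] from List.range_succ]
    simp [pvRow, pvH]

theorem pvPopA_eq_countP (B : Nat) : ∀ mask, mask < 2^B →
    pvPopA mask = (List.range B).countP (fun j => mask.testBit j) := by
  induction B with
  | zero =>
    intro mask h
    interval_cases mask
    simp [pvPopA]
  | succ B ih =>
    intro mask h
    have hdiv : mask / 2 < 2 ^ B := by
      have : (2:Nat) ^ (B+1) = 2 ^ B * 2 := by ring
      omega
    have hrec := ih (mask / 2) hdiv
    rw [List.range_succ_eq_map, List.countP_cons, List.countP_map]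
    have hcomp : ((fun j => mask.testBit j) ∘ Nat.succ) = (fun j => (mask / 2).testBit j) := by
      funext j
      simp [Nat.testBit_add_one]
    rw [hcomp, ← hrec, Nat.testBit_zero]
    match mask with
    | 0 => simp [pvPopA]
    | n+1 =>
      rw [pvPopA]
      rcases Nat.mod_two_eq_zero_or_one (n+1) with h2 | h2 <;> simp [h2] <;> omega

theorem pvPopA_eq (mask : Nat) (h : mask < 1024) : pvPopA mask = pvBc mask :=
  pvPopA_eq_countP 10 mask h

theorem pvBc_le (mask : Nat) : pvBc mask ≤ 10 := by
  have := @List.countP_le_length _ (fun j => mask.testBit j) (List.range 10)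
  simpa [pvBc] using this

theorem pvShift_eq (d : Nat) : (1 <<< d) = 2 ^ d := by
  rw [Nat.shiftLeft_eq, one_mul]

theorem pvOr_lt (mask : Nat) (d : Nat) (hm : mask < 1024) (hd : d < 10) :
    mask ||| (1 <<< d) < 1024 := by
  rw [pvShift_eq]
  have h1 : (2:Nat)^d < 2^10 := Nat.pow_lt_pow_right (by omega) hd
  exact Nat.or_lt_two_pow (by norm_num at *; omega) h1

theorem pvCountP_or_eq (l : List Nat) (hl : l.Nodup) (d : Nat) (hd : d ∈ l) (p : Nat → Bool) :
    l.countP (fun j => p j || decide (j = d)) = l.countP p + (if p d then 0 else 1) := by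
  induction l with
  | nil => cases hd
  | cons a t ih =>
    rw [List.nodup_cons] at hl
    rcases List.mem_cons.mp hd with rfl | hdt
    · -- head is d; predicates agree on t (no j = d there)
      have ht : t.countP (fun j => p j || decide (j = d)) = t.countP p := by
        apply List.countP_congr
        intro x hx
        have : x ≠ d := fun hxd => hl.1 (hxd ▸ hx)
        simp [this]
      rw [List.countP_cons, List.countP_cons, ht]
      by_cases hp : p d <;> simp [hp]
    · have ha : a ≠ d := fun had => hl.1 (had ▸ hdt)
      rw [List.countP_cons, List.countP_cons, ih hl.2 hdt]
      by_cases hp : p a <;> simp [hp, ha] <;> omega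

theorem pvBc_or (mask : Nat) (d : Nat) (hd : d < 10) :
    pvBc (mask ||| (1 <<< d)) = if mask.testBit d then pvBc mask else pvBc mask + 1 := by
  unfold pvBc
  have hpt : ∀ j, (mask ||| (1 <<< d)).testBit j = (mask.testBit j || decide (d = j)) := by
    intro j
    rw [Nat.testBit_or, pvShift_eq, Nat.testBit_two_pow]
  have : (List.range 10).countP (fun j => (mask ||| (1 <<< d)).testBit j)
      = (List.range 10).countP (fun j => mask.testBit j || decide (j = d)) := by
    apply List.countP_congr
    intro x _
    rw [hpt x]
    by_cases hxd : x = d <;> simp [hxd] <;> tauto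
  rw [this, pvCountP_or_eq (List.range 10) (List.nodup_range) d (List.mem_range.mpr hd)]
  by_cases hp : mask.testBit d <;> simp [hp]

theorem pvBc_zero : pvBc 0 = 0 := by
  simp [pvBc, Nat.zero_testBit]

theorem pvBc_mono_or (mask x : Nat) : pvBc mask ≤ pvBc (mask ||| x) := by
  apply List.countP_mono_left
  intro j _ hj
  rw [Nat.testBit_or, hj, Bool.true_or]

-- access into B's rows
theorem pvRow0B_getD (m : Int) (k : Nat) :
    (pvRow0B m).getD k 0 = if k < 12 then (if (k : Int) = m then 1 else 0) else 0 := by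
  by_cases h : k < 12
  · rw [List.getD_eq_getElem?_getD]
    unfold pvRow0B
    rw [List.getElem?_map, List.getElem?_range h]
    simp [h]
  · rw [List.getD_eq_getElem?_getD, List.getElem?_eq_none]
    · simp [h]
    · simp [pvRow0B]; omega

theorem pvStepB_getD (m : Int) (row : List Int) (k : Nat) :
    (pvStepB m row).getD k 0 =
      if k < 11 then
        (if (k : Int) > m then 0
         else (k : Int) * row.getD k 0 + ((10 : Int) - (k : Int)) * row.getD (k + 1) 0)
      else 0 := by
  have hlen : ((List.range 11).map (fun (k : Nat) =>
      if (k : Int) > m then 0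
      else (k : Int) * row.getD k 0 + ((10 : Int) - (k : Int)) * row.getD (k + 1) 0)).length = 11 := by
    simp
  by_cases h : k < 11
  · unfold pvStepB
    rw [List.getD_append _ _ _ _ (by rw [hlen]; exact h)]
    rw [List.getD_eq_getElem?_getD, List.getElem?_map, List.getElem?_range h]
    simp [h]
  · by_cases h12 : k = 11
    · subst h12
      unfold pvStepB
      rw [List.getD_eq_getElem?_getD]
      have h11 : (((List.range 11).map (fun (k : Nat) =>
          if (k : Int) > m then 0
          else (k : Int) * row.getD k 0 + ((10 : Int) - (k : Int)) * row.getD (k + 1) 0)) ++ [(0:Int)])[(11:Nat)]? = some 0 := by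
        conv_lhs => rw [show (11:Nat) = ((List.range 11).map (fun (k : Nat) =>
          if (k : Int) > m then 0
          else (k : Int) * row.getD k 0 + ((10 : Int) - (k : Int)) * row.getD (k + 1) 0)).length from hlen.symm]
        exact List.getElem?_concat_length
      rw [h11]
      simp
    · rw [List.getD_eq_getElem?_getD, List.getElem?_eq_none]
      · simp [h]
      · simp [pvStepB]; omega

theorem pvRow_zero_of_gt (m : Int) (r : Nat) (k : Nat) (hk : (k : Int) > m) :
    (pvRow m r).getD k 0 = 0 := by
  cases r with
  | zero =>
    rw [pvRow, pvRow0B_getD]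
    split_ifs with h1 h2 <;> first | omega | rfl
  | succ r =>
    rw [pvRow, pvStepB_getD]
    split_ifs with h1 h2 <;> first | omega | rfl

-- foldl over an "accumulate" function is init + a sum
theorem pvFoldlAdd (g : Nat → Int) (l : List Nat) (a : Int) :
    l.foldl (fun t d => t + g d) a = a + (l.map g).sum := by
  induction l generalizing a with
  | nil => simp
  | cons x t ih => simp [ih, add_assoc]

theorem pvSumSplit (l : List Nat) (p : Nat → Bool) (x y : Int) :
    (l.map (fun d => if p d then x else y)).sum
      = (l.countP p : Int) * x + ((l.length : Int) - (l.countP p : Int)) * y := by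
  induction l with
  | nil => simp
  | cons a t ih =>
    rw [List.map_cons, List.sum_cons, ih, List.countP_cons]
    by_cases hp : p a <;> simp [hp] <;> push_cast <;> ring

theorem pvSumConst (c : Int) (n : Nat) :
    ((List.range n).map (fun _ => c)).sum = (n : Int) * c := by
  induction n with
  | zero => simp
  | succ n ih => rw [List.range_succ]; simp [ih]; ring

-- dp with popcount already above m and started: every branch is pruned, value 0
theorem pvFoldlId (l : List Nat) (a : Int) : l.foldl (fun t _ => t) a = a := by
  induction l generalizing a <;> simp [*]

theorem pvDpA_dead (s : List Char) (hs : ∀ c ∈ s, 48 ≤ c.toNat ∧ c.toNat ≤ 57) (m : Int) :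
    ∀ (pos : Nat) (mask : Nat) (tight : Bool), mask < 1024 →
      (pvBc mask : Int) > m → pvDpA s m pos mask tight true = 0 := by
  intro pos mask tight hm hgt
  rw [pvDpA]
  by_cases hpos : s.length ≤ pos
  · rw [dif_pos hpos]
    have hp : pvPopA mask = pvBc mask := pvPopA_eq mask hm
    simp only [hp]
    have : ¬ ((pvBc mask : Int) = m) := by omega
    simp [this]
  · rw [dif_neg hpos]
    have hdig := hs (s[pos]'(by omega)) (List.getElem_mem (by omega))
    have hlim : (if tight then pvDigitA (s[pos]'(by omega)) else 9) ≤ 9 := by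
      unfold pvDigitA
      split <;> omega
    rw [PySem.List.foldl_congr_mem _ _ (fun t (_ : Nat) => t) 0 ?_, pvFoldlId]
    intro acc d hd
    have hd9 : d < 10 := by
      have := List.mem_range.mp hd
      omega
    simp only [Bool.not_true, Bool.false_and]
    rw [if_neg (by simp)]
    have hnm : mask ||| (1 <<< d) < 1024 := pvOr_lt mask d hm hd9
    have hmono : pvBc mask ≤ pvBc (mask ||| (1 <<< d)) := pvBc_mono_or mask _
    rw [pvPopA_eq _ hnm, if_pos (by push_cast; omega)]

-- free (non-tight), started dp = the pvRow table at [remaining length][popcount]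
theorem pvDpA_free (s : List Char) (hs : ∀ c ∈ s, 48 ≤ c.toNat ∧ c.toNat ≤ 57) (m : Int) :
    ∀ (fuel pos : Nat) (mask : Nat), s.length - pos = fuel → mask < 1024 →
      pvDpA s m pos mask false true = (pvRow m fuel).getD (pvBc mask) 0 := by
  intro fuel
  induction fuel with
  | zero =>
    intro pos mask hfuel hm
    have hble := pvBc_le mask
    rw [pvDpA, dif_pos (by omega), pvRow, pvRow0B_getD, pvPopA_eq mask hm]
    simp only [Bool.true_eq_false, if_false]
    rw [if_pos (show pvBc mask < 12 by omega)]
  | succ fuel ih =>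
    intro pos mask hfuel hm
    rw [pvDpA, dif_neg (by omega)]
    simp only [if_neg (Bool.false_ne_true), Bool.not_true, Bool.false_and]
    rw [PySem.List.foldl_congr_mem _ _
        (fun t (d : Nat) => t + (pvRow m fuel).getD (pvBc (mask ||| (1 <<< d))) 0) 0 ?_]
    · rw [pvFoldlAdd, zero_add]
      rw [List.map_congr_left (g := fun d =>
            if mask.testBit d then (pvRow m fuel).getD (pvBc mask) 0
            else (pvRow m fuel).getD (pvBc mask + 1) 0) ?_]
      · rw [pvSumSplit]
        have hc : (List.range 10).countP (fun d => mask.testBit d) = pvBc mask := rfl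
        rw [hc]
        have hble := pvBc_le mask
        rw [pvRow, pvStepB_getD, if_pos (by omega)]
        simp only [List.length_range]
        by_cases hgt : (pvBc mask : Int) > m
        · rw [if_pos hgt, pvRow_zero_of_gt m fuel _ hgt,
              pvRow_zero_of_gt m fuel _ (by push_cast; omega)]
          ring
        · rw [if_neg hgt]
          push_cast
          ring
      · intro d hd
        have hd9 : d < 10 := List.mem_range.mp hd
        rw [pvBc_or mask d hd9]
        by_cases hb : mask.testBit d <;> simp [hb]
    · intro acc d hd
      have hd9 : d < 10 := List.mem_range.mp hd
      have hnm : mask ||| (1 <<< d) < 1024 := pvOr_lt mask d hm hd9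
      have hpp := pvPopA_eq _ hnm
      simp only [Bool.not_true, Bool.false_and, Bool.false_eq_true, if_false, hpp]
      by_cases hgt : (pvBc (mask ||| (1 <<< d)) : Int) > m
      · rw [if_pos hgt, pvRow_zero_of_gt m fuel _ hgt, add_zero]
      · rw [if_neg hgt, ih (pos + 1) _ (by omega) hnm]

-- free, un-started dp = the pvH table at [remaining length]
theorem pvDpA_unstarted (s : List Char) (hs : ∀ c ∈ s, 48 ≤ c.toNat ∧ c.toNat ≤ 57) (m : Int) :
    ∀ (fuel pos : Nat), s.length - pos = fuel →
      pvDpA s m pos 0 false false = pvH m fuel := by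
  intro fuel
  induction fuel with
  | zero =>
    intro pos hfuel
    rw [pvDpA, dif_pos (by omega), pvH]
    simp
  | succ fuel ih =>
    intro pos hfuel
    rw [pvDpA, dif_neg (by omega)]
    simp only [if_neg (Bool.false_ne_true)]
    rw [show (9 + 1 : Nat) = 10 from rfl, List.range_succ_eq_map, List.foldl_cons]
    rw [List.foldl_map]
    rw [PySem.List.foldl_congr_mem _ _
        (fun t (_ : Nat) => t + (pvRow m fuel).getD 1 0) _ ?_]
    · rw [pvFoldlAdd, pvSumConst, pvH]
      push_cast
      congr 1
      rw [if_pos (by simp), zero_add]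
      exact ih (pos + 1) (by omega)
    · intro acc j hj
      have hj9 : j < 9 := List.mem_range.mp hj
      have h1 : (0 : Nat) ||| (1 <<< (j+1)) < 1024 := pvOr_lt 0 (j+1) (by omega) (by omega)
      have hbc : pvBc (0 ||| (1 <<< (j+1))) = 1 := by
        rw [pvBc_or 0 (j+1) (by omega), if_neg (by simp [Nat.zero_testBit]), pvBc_zero]
      have hpp := pvPopA_eq _ h1
      have hfree := pvDpA_free s hs m fuel (pos+1) (0 ||| (1 <<< (j+1)))
        (by omega) h1
      simp only [Nat.succ_eq_add_one, Bool.not_false, Bool.true_and, Bool.false_and,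
        Bool.false_eq_true, if_false, hpp, hbc, Nat.cast_one]
      rw [if_neg (by simp)]
      by_cases hgt : (1 : Int) > m
      · rw [if_pos hgt, pvRow_zero_of_gt m fuel 1 (by exact_mod_cast hgt)]
        simp
      · rw [if_neg hgt, hfree, hbc]


theorem pvGetD_map_range {α : Type} (f : Nat → α) (dflt : α) (n r : Nat) (h : r < n) :
    ((List.range n).map f).getD r dflt = f r := by
  rw [List.getD_eq_getElem?_getD, List.getElem?_map, List.getElem?_range h]
  rfl

theorem pvDigitCharDigit (k : Nat) (hk : k < 10) :
    48 ≤ (Nat.digitChar k).toNat ∧ (Nat.digitChar k).toNat ≤ 57 := by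
  interval_cases k <;> decide

theorem pvToDigitsCoreDigits : ∀ (f n : Nat) (acc : List Char),
    (∀ c ∈ acc, 48 ≤ c.toNat ∧ c.toNat ≤ 57) →
    ∀ c ∈ Nat.toDigitsCore 10 f n acc, 48 ≤ c.toNat ∧ c.toNat ≤ 57 := by
  intro f
  induction f with
  | zero =>
    intro n acc hacc c hc
    exact hacc c hc
  | succ f ih =>
    intro n acc hacc c hc
    simp only [Nat.toDigitsCore] at hc
    have hdig := pvDigitCharDigit (n % 10) (Nat.mod_lt n (by omega))
    by_cases h0 : n / 10 = 0
    · rw [if_pos h0] at hc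
      rcases List.mem_cons.mp hc with rfl | hmem
      · exact hdig
      · exact hacc c hmem
    · rw [if_neg h0] at hc
      refine ih (n / 10) _ ?_ c hc
      intro c' hc'
      rcases List.mem_cons.mp hc' with rfl | hmem
      · exact hdig
      · exact hacc c' hmem

theorem pvToStrDigits (N : Int) (h : 0 ≤ N) :
    ∀ c ∈ (PySem.Int.toStr N).toList, 48 ≤ c.toNat ∧ c.toNat ≤ 57 := by
  rw [PySem.Int.toList_toStr]
  unfold PySem.Int.toChars
  rw [if_neg (by omega)]
  unfold Nat.toDigits
  exact pvToDigitsCoreDigits (N.toNat + 1) N.toNat [] (by simp)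

theorem pvAddLen (used : PySem.Set Int) (mask : Nat) (d : Nat) (hd : d < 10)
    (hmem : ∀ x : Int, x ∈ used ↔ ∃ j : Nat, j < 10 ∧ x = (j : Int) ∧ mask.testBit j = true)
    (hlen : used.length = pvBc mask) :
    (PySem.Set.add used (d : Int)).length = pvBc (mask ||| (1 <<< d)) := by
  rw [pvBc_or mask d hd]
  unfold PySem.Set.add
  by_cases hb : mask.testBit d
  · have hin : (d : Int) ∈ used := (hmem d).mpr ⟨d, hd, rfl, hb⟩
    rw [if_pos ((PySem.Set.contains_iff _ _).mpr hin), hlen, if_pos hb]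
  · have hnin : ¬ (d : Int) ∈ used := by
      rw [hmem]
      rintro ⟨j, hj, hdj, hbj⟩
      have : d = j := by exact_mod_cast hdj
      exact hb (this ▸ hbj)
    rw [if_neg (by rw [PySem.Set.contains_iff]; exact hnin), if_neg hb]
    simp [hlen]

theorem pvAddMem (used : PySem.Set Int) (mask : Nat) (d : Nat) (hd : d < 10)
    (hmem : ∀ x : Int, x ∈ used ↔ ∃ j : Nat, j < 10 ∧ x = (j : Int) ∧ mask.testBit j = true) :
    ∀ x : Int, x ∈ PySem.Set.add used (d : Int) ↔
      ∃ j : Nat, j < 10 ∧ x = (j : Int) ∧ (mask ||| (1 <<< d)).testBit j = true := by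
  intro x
  rw [PySem.Set.mem_add, hmem]
  constructor
  · rintro (⟨j, hj, rfl, hbj⟩ | rfl)
    · exact ⟨j, hj, rfl, by rw [Nat.testBit_or, hbj, Bool.true_or]⟩
    · exact ⟨d, hd, rfl, by rw [Nat.testBit_or, pvShift_eq, Nat.testBit_two_pow]; simp⟩
  · rintro ⟨j, hj, rfl, hbj⟩
    rw [Nat.testBit_or, pvShift_eq, Nat.testBit_two_pow] at hbj
    rcases (by simpa using hbj : mask.testBit j = true ∨ d = j) with h | h
    · exact Or.inl ⟨j, hj, rfl, h⟩
    · exact Or.inr (by rw [h])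

-- B's scan step with the tables replaced by their closed forms (pvTablesB_eq)
def pvStepSc (s : List Char) (m : Int) (st : Int × PySem.Set Int × Bool)
    (p : Int × Char) : Int × PySem.Set Int × Bool :=
  let total := st.1
  let used := st.2.1
  let started := st.2.2
  let D : Nat := pvDigitB p.2
  let r : Nat := s.length - 1 - p.1.toNat
  let total :=
    (List.range D).foldl
      (fun t (d : Nat) =>
        if !started && d == 0 then t + ((List.range (s.length+1)).map (pvH m)).getD r 0
        else
          let k2 := (PySem.Set.add used (d : Int)).length
          if (k2 : Int) ≤ m then
            t + (((List.range (s.length+1)).map (pvRow m)).getD r []).getD k2 0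
          else t)
      total
  if started || D != 0 then (total, PySem.Set.add used (D : Int), true)
  else (total, used, started)

theorem pvAltEq (N : Int) (m : Int) :
    count_exact_distinct_digits_alt N m =
      (let s := (PySem.Int.toStr N).toList
       let res := (PySem.List.enumerate s).foldl (pvStepSc s m)
         (0, (PySem.Set.empty : PySem.Set Int), false)
       if res.2.2 && ((res.2.1.length : Int) == m) then res.1 + 1 else res.1) := by
  unfold count_exact_distinct_digits_alt pvStepSc
  simp only [pvTablesB_eq]

-- the per-digit contribution of a strictly smaller digit at remaining length r
def pvCB (m : Int) (started : Bool) (mask : Nat) (r : Nat) (d : Nat) : Int :=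
  if !started && d == 0 then pvH m r
  else if (pvBc (mask ||| (1 <<< d)) : Int) ≤ m then
    (pvRow m r).getD (pvBc (mask ||| (1 <<< d))) 0
  else 0

theorem pvScanEq (s : List Char) (hs : ∀ c ∈ s, 48 ≤ c.toNat ∧ c.toNat ≤ 57) (m : Int) :
    ∀ (suf : List Char) (i : Nat) (total : Int) (used : PySem.Set Int) (started : Bool)
      (mask : Nat),
      s.drop i = suf →
      mask < 1024 →
      (∀ x : Int, x ∈ used ↔ ∃ j : Nat, j < 10 ∧ x = (j : Int) ∧ mask.testBit j = true) →
      used.length = pvBc mask →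
      (started = false → mask = 0) →
      (let res := (PySem.List.enumerate suf (i : Int)).foldl (pvStepSc s m)
          (total, used, started)
       if res.2.2 && ((res.2.1.length : Int) == m) then res.1 + 1 else res.1)
      = total + pvDpA s m i mask true started := by
  intro suf
  induction suf with
  | nil =>
    intro i total used started mask hdrop hm hmem hlen hst
    have hi : s.length ≤ i := List.drop_eq_nil_iff.mp hdrop
    simp only [PySem.List.enumerate_nil, List.foldl_nil]
    rw [pvDpA, dif_pos hi]
    cases started
    · simp
    · simp only [Bool.true_and, hlen, pvPopA_eq mask hm, beq_iff_eq, Bool.true_eq_false,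
        if_false]
      split_ifs <;> omega
  | cons ch rest ih =>
    intro i total used started mask hdrop hm hmem hlen hst
    have hi : i < s.length := by
      by_contra h
      rw [List.drop_eq_nil_of_le (by omega)] at hdrop
      cases hdrop
    obtain ⟨hch, hrest⟩ : ch = s[i] ∧ rest = s.drop (i+1) := by
      have := (hdrop.symm.trans (List.drop_eq_getElem_cons hi))
      exact ⟨(List.cons_eq_cons.mp this).1, (List.cons_eq_cons.mp this).2⟩
    subst hch
    have hdig := hs s[i] (List.getElem_mem hi)
    have hD9 : pvDigitB s[i] ≤ 9 := by unfold pvDigitB; omega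
    rw [PySem.List.enumerate_cons, List.foldl_cons,
        show ((i : Int) + 1) = ((i + 1 : Nat) : Int) by push_cast; ring]
    by_cases hA : started = false ∧ pvDigitB s[i] = 0
    · obtain ⟨h1, h2⟩ := hA
      subst h1
      have hm0 : mask = 0 := hst rfl
      subst hm0
      have hstep : pvStepSc s m (total, used, false) ((i : Int), s[i]) = (total, used, false) := by
        unfold pvStepSc
        simp [h2]
      have hstep0 : pvDpA s m i 0 true false = pvDpA s m (i + 1) 0 true false := by
        rw [pvDpA, dif_neg (by omega), if_pos rfl]
        have hAB : pvDigitA (s[i]'(by omega)) = 0 := h2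
        simp [hAB, List.range_one]
      rw [hstep, ih (i + 1) total used false 0 hrest.symm (by omega) hmem hlen (fun _ => rfl),
          hstep0]
    · -- started, or a nonzero digit: the tight set gains this digit
      have hDbool : (started || (pvDigitB s[i] != 0)) = true := by
        cases started
        · simp only [Bool.false_or, bne_iff_ne, ne_eq]
          tauto
        · simp
      have hcond : (!started && (pvDigitB s[i] == 0)) = false := by
        cases started
        · simp only [Bool.not_false, Bool.true_and, beq_eq_false_iff_ne, ne_eq]
          tauto
        · simp
      have hnm : mask ||| (1 <<< pvDigitB s[i]) < 1024 := pvOr_lt mask _ hm (by omega)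
      have hstep : pvStepSc s m (total, used, started) ((i : Int), s[i]) =
          (total + ((List.range (pvDigitB s[i])).map
              (pvCB m started mask (s.length - (i + 1)))).sum,
           PySem.Set.add used ((pvDigitB s[i] : Nat) : Int), true) := by
        unfold pvStepSc
        dsimp only
        rw [show s.length - 1 - ((i : Int)).toNat = s.length - (i + 1) from by
              rw [Int.toNat_natCast]; omega,
            if_pos hDbool]
        rw [PySem.List.foldl_congr_mem _ _
            (fun t d => t + pvCB m started mask (s.length - (i + 1)) d) total ?_, pvFoldlAdd]
        intro t d hd
        have hdD : d < pvDigitB s[i] := List.mem_range.mp hd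
        dsimp only [pvCB]
        rw [pvAddLen used mask d (by omega) hmem hlen,
            pvGetD_map_range (pvH m) 0 (s.length + 1) (s.length - (i + 1)) (by omega),
            pvGetD_map_range (pvRow m) [] (s.length + 1) (s.length - (i + 1)) (by omega)]
        by_cases hc : (!started && (d == 0)) = true
        · rw [if_pos hc, if_pos hc]
        · rw [if_neg hc, if_neg hc]
          by_cases hle : (pvBc (mask ||| (1 <<< d)) : Int) ≤ m
          · rw [if_pos hle, if_pos hle]
          · rw [if_neg hle, if_neg hle, add_zero]
      have hAdp : pvDpA s m i mask true started =
          ((List.range (pvDigitB s[i])).map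
              (pvCB m started mask (s.length - (i + 1)))).sum
            + pvDpA s m (i + 1) (mask ||| (1 <<< pvDigitB s[i])) true true := by
        rw [pvDpA, dif_neg (by omega), if_pos rfl]
        have hAB : pvDigitA (s[i]'(by omega)) = pvDigitB s[i] := rfl
        dsimp only
        rw [hAB,
            show List.range (pvDigitB s[i] + 1)
              = List.range (pvDigitB s[i]) ++ [pvDigitB s[i]] from List.range_succ,
            List.foldl_append, List.foldl_cons, List.foldl_nil]
        rw [PySem.List.foldl_congr_mem _ _
            (fun t d => t + pvCB m started mask (s.length - (i + 1)) d) 0 ?_, pvFoldlAdd,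
            zero_add]
        · -- the last, still-tight digit d = D
          rw [if_neg (by simp [hcond])]
          simp only [pvPopA_eq _ hnm, beq_self_eq_true, Bool.and_true]
          by_cases hgt : (pvBc (mask ||| (1 <<< pvDigitB s[i])) : Int) > m
          · rw [if_pos hgt, pvDpA_dead s hs m (i + 1) _ true hnm hgt, add_zero]
          · rw [if_neg hgt]
        · intro t d hd
          have hdD : d < pvDigitB s[i] := List.mem_range.mp hd
          have hd10 : d < 10 := by omega
          have hdne : (d == pvDigitB s[i]) = false := by
            simp only [beq_eq_false_iff_ne, ne_eq]
            omega
          have hnmd : mask ||| (1 <<< d) < 1024 := pvOr_lt mask d hm hd10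
          dsimp only [pvCB]
          simp only [pvPopA_eq _ hnmd, Bool.true_and, hdne, Bool.and_false]
          by_cases hc : (!started && (d == 0)) = true
          · rw [if_pos hc, if_pos hc,
                pvDpA_unstarted s hs m (s.length - (i + 1)) (i + 1) (by omega)]
          · rw [if_neg hc, if_neg hc]
            by_cases hgt : (pvBc (mask ||| (1 <<< d)) : Int) > m
            · rw [if_pos hgt, if_neg (by omega), add_zero]
            · rw [if_neg hgt, if_pos (by omega),
                  pvDpA_free s hs m (s.length - (i + 1)) (i + 1) _ (by omega) hnmd]
      rw [hstep,
          ih (i + 1) _ (PySem.Set.add used ((pvDigitB s[i] : Nat) : Int)) true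
            (mask ||| (1 <<< pvDigitB s[i])) hrest.symm hnm
            (pvAddMem used mask (pvDigitB s[i]) (by omega) hmem)
            (pvAddLen used mask (pvDigitB s[i]) (by omega) hmem hlen)
            (by simp),
          hAdp]
      ring
-- ===== VERDICT (by name: the statement is the Claim_ definition above) =====
theorem count_exact_distinct_digits_spec : Claim_equal_count_exact_distinct_digits := by
  intro N m hdom hpre
  unfold Spec_count_exact_distinct_digits
  have hs := pvToStrDigits N hpre
  have h := pvScanEq ((PySem.Int.toStr N).toList) hs m ((PySem.Int.toStr N).toList) 0 0
    (PySem.Set.empty : PySem.Set Int) false 0 (by simp) (by omega)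
    (by intro x; simp [PySem.Set.empty, Nat.zero_testBit])
    (by simp [PySem.Set.empty, pvBc_zero]) (fun _ => rfl)
  simp only [Nat.cast_zero, zero_add] at h
  rw [pvAltEq]
  unfold count_exact_distinct_digits
  dsimp only
  rw [← h]
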